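-- pv_equiv track=rewrite | github.com/DmitryChitalov/python_basics | Урок 4. Практическое задание/task_6.py | replicate_list_element
-- ===== SOURCE A (Python) =====
-- def replicate_list_element(lst, replication_count):
--     iterator = 0
--     ndx = 0
--     lst_len = len(lst)
--     replication_count = replication_count
--     while iterator < replication_count and lst_len > 0:
--         if ndx >= lst_len:
--             ndx = 0
--
--         yield lst[ndx]
--         ndx += 1
--         iterator += 1
-- ===== SOURCE B (Python) =====
-- def replicate_list_element(lst, replication_count):
--     # closed form: whole copies of the list, then a prefix remainder
--     if not lst or replication_count <= 0:
--         return
--     full, rem = divmod(replication_count, len(lst))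
--     yield from lst * full
--     yield from lst[:rem]
-- ===== Notes on version B (the rewrite author's own statement) =====
-- stated objective: alternative
-- what changed: Replaces the per-element while loop with explicit iterator/index counters by a divmod closed form: yield the list repeated full times and then a prefix of length rem, with no index bookkeeping.
import Mathlib
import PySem

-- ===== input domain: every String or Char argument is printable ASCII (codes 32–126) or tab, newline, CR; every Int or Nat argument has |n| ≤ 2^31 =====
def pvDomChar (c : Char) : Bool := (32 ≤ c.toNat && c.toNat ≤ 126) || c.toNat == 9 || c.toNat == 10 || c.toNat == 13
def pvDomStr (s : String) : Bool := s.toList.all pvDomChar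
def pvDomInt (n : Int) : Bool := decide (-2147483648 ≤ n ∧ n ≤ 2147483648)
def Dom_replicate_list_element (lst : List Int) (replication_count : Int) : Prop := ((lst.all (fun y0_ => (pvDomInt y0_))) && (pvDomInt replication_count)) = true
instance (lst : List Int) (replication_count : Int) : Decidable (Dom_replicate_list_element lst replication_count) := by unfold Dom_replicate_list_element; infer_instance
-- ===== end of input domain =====

-- B replaces A's element-by-element while loop (iterator + wrap-around index) by the
-- divmod closed form "full whole copies of the list ++ a prefix of length rem" (objective: alternative).

-- ===== PORT A =====
-- the while loop: fuel = remaining iterations (replication_count - iterator), ndx the running index;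
-- ndx is reset to 0 when it reaches lst.length, so lst[ndx] is always in range (getD 0 is never the default)
def pvLoopA (lst : List Int) : Nat → Nat → List Int
  | 0, _ => []
  | fuel + 1, ndx =>
      let ndx := if ndx ≥ lst.length then 0 else ndx
      lst.getD ndx 0 :: pvLoopA lst fuel (ndx + 1)

def replicate_list_element (lst : List Int) (replication_count : Int) : List Int :=
  -- 'while iterator < replication_count and lst_len > 0': runs max(replication_count,0) times unless lst is empty
  if lst.length > 0 then pvLoopA lst replication_count.toNat 0 else []

-- ===== PORT B =====
def replicate_list_element_alt (lst : List Int) (replication_count : Int) : List Int :=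
  if lst = [] ∨ replication_count ≤ 0 then []
  else
    let full := PySem.Int.floordiv replication_count lst.length
    let rem := PySem.Int.mod replication_count lst.length
    (List.replicate full.toNat lst).flatten ++ PySem.List.slice lst none (some rem)

-- ===== PRECONDITION & SPEC =====
def Spec_replicate_list_element (lst : List Int) (replication_count : Int) (out : List Int) : Prop := out = replicate_list_element_alt lst replication_count
instance (lst : List Int) (replication_count : Int) (out : List Int) : Decidable (Spec_replicate_list_element lst replication_count out) := by unfold Spec_replicate_list_element; infer_instance

-- ===== CLAIM (what is proved, stated in full; the proofs are below) =====
def Claim_equal_replicate_list_element : Prop := ∀ (lst : List Int) (replication_count : Int), Dom_replicate_list_element lst replication_count → Spec_replicate_list_element lst replication_count (replicate_list_element lst replication_count)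

-- ===== LEMMAS AND PROOFS =====

-- the common characterisation: the i-th yielded element is lst[(ndx + i) % len]
theorem pvLoopA_eq_map (lst : List Int) (hne : lst ≠ []) :
    ∀ (fuel ndx : Nat), ndx ≤ lst.length →
      pvLoopA lst fuel ndx
        = (List.range fuel).map (fun i => lst.getD ((ndx + i) % lst.length) 0) := by
  intro fuel
  induction fuel with
  | zero => intro ndx _; simp [pvLoopA]
  | succ f ih =>
    intro ndx hndx
    have hlen : 0 < lst.length := List.length_pos_of_ne_nil hne
    rw [pvLoopA, List.range_succ_eq_map, List.map_cons, List.map_map]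
    by_cases h : ndx ≥ lst.length
    · have hEq : ndx = lst.length := le_antisymm hndx h
      simp only [if_pos h]
      rw [ih 1 (by omega)]
      congr 1
      · subst hEq; simp [Nat.mod_self]
      · apply List.map_congr_left
        intro i _
        simp only [Function.comp]
        subst hEq
        have : lst.length + (i + 1) = lst.length + (1 + i) := by omega
        rw [show lst.length + Nat.succ i = lst.length + (1 + i) from by omega,
            Nat.add_mod_left]
    · simp only [if_neg h]
      rw [ih (ndx + 1) (by omega)]
      congr 1
      · rw [Nat.add_zero, Nat.mod_eq_of_lt (by omega)]
      · apply List.map_congr_left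
        intro i _
        simp only [Function.comp, Nat.succ_eq_add_one]
        rw [show ndx + (i + 1) = ndx + 1 + i from by omega]

-- a prefix of length r ≤ len, written via the modular map
theorem pv_take_eq_map (lst : List Int) (r : Nat) (hr : r ≤ lst.length) :
    (List.range r).map (fun i => lst.getD (i % lst.length) 0) = lst.take r := by
  apply List.ext_getElem
  · simp [hr]
  · intro i h1 h2
    simp only [List.getElem_map, List.getElem_range, List.getElem_take]
    have hi : i < lst.length := by
      simp at h1 h2
      omega
    rw [Nat.mod_eq_of_lt hi, List.getD_eq_getElem _ _ hi]

-- peel one full cycle off the modular map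
theorem pv_cycle_peel (lst : List Int) (m : Nat) :
    (List.range (lst.length + m)).map (fun i => lst.getD (i % lst.length) 0)
      = lst ++ (List.range m).map (fun i => lst.getD (i % lst.length) 0) := by
  rw [List.range_add, List.map_append, List.map_map]
  congr 1
  · rw [pv_take_eq_map lst lst.length le_rfl, List.take_length]
  · apply List.map_congr_left
    intro i _
    simp only [Function.comp]
    rw [Nat.add_mod_left]

-- the closed form: full copies then a prefix of length rem
theorem pv_map_eq_closed (lst : List Int) (full rem : Nat)
    (hrem : rem ≤ lst.length) :
    (List.range (full * lst.length + rem)).map (fun i => lst.getD (i % lst.length) 0)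
      = (List.replicate full lst).flatten ++ lst.take rem := by
  induction full with
  | zero => simpa using pv_take_eq_map lst rem hrem
  | succ k ih =>
    have : (k + 1) * lst.length + rem = lst.length + (k * lst.length + rem) := by ring
    rw [this, pv_cycle_peel lst, ih, List.replicate_succ, List.flatten_cons,
        List.append_assoc]

-- ===== VERDICT (by name: the statement is the Claim_ definition above) =====
theorem replicate_list_element_spec : Claim_equal_replicate_list_element := by
  intro lst rc _
  unfold Spec_replicate_list_element replicate_list_element replicate_list_element_alt
  by_cases hne : lst = []
  · simp [hne]
  · have hlen : 0 < lst.length := List.length_pos_of_ne_nil hne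
    by_cases hrc : rc ≤ 0
    · have : rc.toNat = 0 := by omega
      simp [hne, hrc, hlen, this, pvLoopA]
    · rw [if_pos hlen]
      have hL : (0 : Int) < (lst.length : Int) := by exact_mod_cast hlen
      have hdm := PySem.Int.floordiv_mul_add_mod rc (lst.length : Int)
      set q := PySem.Int.floordiv rc (lst.length : Int) with hq
      set r := PySem.Int.mod rc (lst.length : Int) with hr
      have hr0 : 0 ≤ r ∧ r < (lst.length : Int) := by
        constructor
        · exact PySem.Int.mod_nonneg rc hL
        · exact PySem.Int.mod_lt rc hL
      have hq0 : 0 ≤ q := by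
        by_contra hneg
        push Not at hneg
        have h1 : q ≤ -1 := by omega
        have h2 : q * (lst.length : Int) ≤ -1 * (lst.length : Int) :=
          mul_le_mul_of_nonneg_right h1 (by positivity)
        nlinarith [hr0.2]
      have hsplit : rc.toNat = q.toNat * lst.length + r.toNat := by
        have hcast : ((q.toNat * lst.length + r.toNat : Nat) : Int) = rc := by
          push_cast
          rw [Int.toNat_of_nonneg hq0, Int.toNat_of_nonneg hr0.1]
          linarith [hdm]
        omega
      rw [pvLoopA_eq_map lst hne rc.toNat 0 (by omega)]
      simp only [Nat.zero_add]
      rw [hsplit, pv_map_eq_closed lst q.toNat r.toNat (by omega),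
          PySem.List.slice_to _ hr0.1, if_neg (show ¬(lst = [] ∨ rc ≤ 0) from by tauto)]
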